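-- pv_equiv track=rewrite | github.com/bostonrobbie/BDR | src/agents/linkedin_optimizer.py | _strip_greeting
-- ===== SOURCE A (Python) =====
-- def _strip_greeting(body: str, first_name: str = "") -> str:
--     """Strip the 'Hi Name,' greeting and leading whitespace.
--
--     LinkedIn already shows the recipient's name, so the greeting
--     is wasted preview space. We measure from after the greeting.
--     """
--     lines = body.split("\n")
--     content_start = 0
--
--     for i, line in enumerate(lines):
--         stripped = line.strip()
--         if not stripped:
--             continue
--         # Check if this line is a greeting
--         if first_name and stripped.lower().startswith(f"hi {first_name.lower()}"):
--             content_start = i + 1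
--             break
--         if stripped.lower().startswith(("hi ", "hey ", "hello ")):
--             content_start = i + 1
--             break
--         break  # First non-empty line isn't a greeting, start from here
--
--     # Skip blank lines after greeting
--     while content_start < len(lines) and not lines[content_start].strip():
--         content_start += 1
--
--     return "\n".join(lines[content_start:]).strip()
-- ===== SOURCE B (Python) =====
-- def _strip_greeting(body: str, first_name: str = "") -> str:
--     """Strip the 'Hi Name,' greeting and leading whitespace (loop-free)."""
--     stripped = body.strip()
--     if not stripped:
--         return ""
--     first_line, _, rest = stripped.partition("\n")
--     head = first_line.strip().lower()
--     if (first_name and head.startswith(f"hi {first_name.lower()}")) or \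
--             head.startswith(("hi ", "hey ", "hello ")):
--         return rest.strip()
--     return stripped
-- ===== Notes on version B (the rewrite author's own statement) =====
-- stated objective: simpler
-- what changed: B replaces A's split-into-lines, enumerate-with-break scan and blank-skipping while-loop by a loop-free decomposition: strip the whole body once, partition off the first line at the first newline, test it with the same greeting predicate, and return rest.strip() or the stripped body.
import Mathlib
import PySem

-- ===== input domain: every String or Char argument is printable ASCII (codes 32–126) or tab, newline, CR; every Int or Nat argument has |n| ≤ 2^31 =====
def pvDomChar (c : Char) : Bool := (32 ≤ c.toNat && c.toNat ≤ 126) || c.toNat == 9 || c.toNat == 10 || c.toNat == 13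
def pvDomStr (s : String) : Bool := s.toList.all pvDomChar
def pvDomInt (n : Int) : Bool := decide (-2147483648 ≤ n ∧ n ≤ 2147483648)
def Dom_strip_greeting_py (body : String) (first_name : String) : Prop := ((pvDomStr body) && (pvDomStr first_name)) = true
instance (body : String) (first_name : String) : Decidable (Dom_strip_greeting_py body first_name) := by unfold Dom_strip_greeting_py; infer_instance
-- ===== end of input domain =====

-- B replaces A's line-splitting scan loops by a loop-free strip/partition decomposition (objective: simpler).


-- ===== PORT A =====
-- the 'for i, line in enumerate(lines)' loop with its breaks ('continue' on blank,
-- i+1 on a greeting, 0 — the unchanged initial content_start — otherwise)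
def findStartA (fn : List Char) (i : Nat) : List (List Char) → Nat
  | [] => 0
  | line :: rest =>
    let stripped := PySem.Chars.strip line
    if stripped = [] then findStartA fn (i + 1) rest
    else if fn ≠ [] ∧ PySem.Chars.startswith (PySem.Chars.lower stripped) ('h' :: 'i' :: ' ' :: PySem.Chars.lower fn) = true then i + 1
    else if (PySem.Chars.startswith (PySem.Chars.lower stripped) ['h','i',' ']
          || PySem.Chars.startswith (PySem.Chars.lower stripped) ['h','e','y',' ']
          || PySem.Chars.startswith (PySem.Chars.lower stripped) ['h','e','l','l','o',' ']) = true then i + 1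
    else 0

-- the 'while content_start < len(lines) and not lines[content_start].strip()' loop
-- (the index is always in range when read, so getD's default is never used)
def skipBlanksA (lines : List (List Char)) (i : Nat) : Nat :=
  if h : i < lines.length ∧ PySem.Chars.strip (lines.getD i []) = [] then skipBlanksA lines (i + 1) else i
termination_by lines.length - i
decreasing_by omega

def strip_greeting_py (body : String) (first_name : String) : String :=
  let lines := PySem.Chars.splitOn body.toList ['\n']
  let cs0 := findStartA first_name.toList 0 lines
  let cs1 := skipBlanksA lines cs0
  -- lines[content_start:] with a nonnegative index is List.drop
  String.ofList (PySem.Chars.strip (PySem.Chars.join ['\n'] (lines.drop cs1)))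

-- ===== PORT B =====
def strip_greeting_py_alt (body : String) (first_name : String) : String :=
  let stripped := PySem.Chars.strip body.toList
  if stripped = [] then ""
  else
    -- stripped.partition("\n") ported by hand (exact for this 1-char separator):
    -- first_line = chars before the first '\n', rest = chars after it ([] if none)
    let first_line := stripped.takeWhile (fun c => c != '\n')
    let rest := (stripped.dropWhile (fun c => c != '\n')).drop 1
    let head := PySem.Chars.lower (PySem.Chars.strip first_line)
    if (first_name.toList ≠ [] ∧ PySem.Chars.startswith head ('h' :: 'i' :: ' ' :: PySem.Chars.lower first_name.toList) = true)
        ∨ (PySem.Chars.startswith head ['h','i',' ']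
          || PySem.Chars.startswith head ['h','e','y',' ']
          || PySem.Chars.startswith head ['h','e','l','l','o',' ']) = true
    then String.ofList (PySem.Chars.strip rest)
    else String.ofList stripped

-- ===== PRECONDITION & SPEC =====
def Spec_strip_greeting_py (body : String) (first_name : String) (out : String) : Prop := out = strip_greeting_py_alt body first_name
instance (body : String) (first_name : String) (out : String) : Decidable (Spec_strip_greeting_py body first_name out) := by unfold Spec_strip_greeting_py; infer_instance

-- ===== CLAIM (what is proved, stated in full; the proofs are below) =====
def Claim_equal_strip_greeting_py : Prop := ∀ (body : String) (first_name : String), Dom_strip_greeting_py body first_name → Spec_strip_greeting_py body first_name (strip_greeting_py body first_name)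

-- ===== LEMMAS AND PROOFS =====

-- proof-side helpers
def pblank (l : List Char) : Bool := decide (PySem.Chars.strip l = [])

def gtest (fn l : List Char) : Bool :=
  (decide (fn ≠ []) && PySem.Chars.startswith (PySem.Chars.lower (PySem.Chars.strip l)) ('h' :: 'i' :: ' ' :: PySem.Chars.lower fn))
  || PySem.Chars.startswith (PySem.Chars.lower (PySem.Chars.strip l)) ['h','i',' ']
  || PySem.Chars.startswith (PySem.Chars.lower (PySem.Chars.strip l)) ['h','e','y',' ']
  || PySem.Chars.startswith (PySem.Chars.lower (PySem.Chars.strip l)) ['h','e','l','l','o',' ']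

-- structural version of split("\n")
def mySplit : List Char → List (List Char)
  | [] => [[]]
  | c :: rest =>
    if c = '\n' then [] :: mySplit rest
    else match mySplit rest with
      | [] => [[c]]
      | p :: ps => (c :: p) :: ps

def consHead (pre : List Char) : List (List Char) → List (List Char)
  | [] => [pre]
  | p :: ps => (pre ++ p) :: ps

lemma mySplit_ne_nil (l : List Char) : mySplit l ≠ [] := by
  cases l with
  | nil => simp [mySplit]
  | cons c rest =>
    simp only [mySplit]
    split
    · simp
    · split <;> simp

lemma go_spec : ∀ (fuel : Nat) (l cur : List Char) (acc : List (List Char)), l.length < fuel →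
    PySem.Chars.splitOn.go ['\n'] fuel l cur acc = acc.reverse ++ consHead cur.reverse (mySplit l) := by
  intro fuel
  induction fuel with
  | zero => intro l cur acc h; omega
  | succ n ih =>
    intro l cur acc h
    cases l with
    | nil =>
      rw [PySem.Chars.splitOn.go]
      simp [mySplit, consHead]
      omega
    | cons c rest =>
      rw [PySem.Chars.splitOn.go]
      by_cases hc : c = '\n'
      · subst hc
        simp only [List.isPrefixOf, BEq.rfl, Bool.and_self, if_true]
        have hdrop : List.drop (['\n'] : List Char).length ('\n' :: rest) = rest := rfl
        rw [hdrop, ih rest [] (cur.reverse :: acc) (by simpa using h)]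
        cases hm : mySplit rest with
        | nil => exact absurd hm (mySplit_ne_nil rest)
        | cons p ps => simp [mySplit, hm, consHead]
      · have hpre : (['\n'].isPrefixOf (c :: rest)) = false := by
          simp [List.isPrefixOf]; exact fun hh => absurd hh.symm hc
        simp only [hpre, Bool.false_eq_true, if_false]
        rw [ih rest (c :: cur) acc (by simpa using h)]
        simp only [List.reverse_cons]
        cases hm : mySplit rest with
        | nil => exact absurd hm (mySplit_ne_nil rest)
        | cons p ps =>
          simp [mySplit, hc, hm, consHead]

lemma splitOn_eq_mySplit (l : List Char) : PySem.Chars.splitOn l ['\n'] = mySplit l := by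
  unfold PySem.Chars.splitOn
  rw [go_spec (l.length + 1) l [] [] (by omega)]
  cases hm : mySplit l with
  | nil => exact absurd hm (mySplit_ne_nil l)
  | cons p ps => simp [consHead]

lemma join_mySplit (l : List Char) : PySem.Chars.join ['\n'] (mySplit l) = l := by
  induction l with
  | nil => simp [mySplit, PySem.Chars.join_singleton]
  | cons c rest ih =>
    by_cases hc : c = '\n'
    · subst hc
      simp only [mySplit, if_true]
      cases hm : mySplit rest with
      | nil => exact absurd hm (mySplit_ne_nil rest)
      | cons p ps =>
        rw [hm] at ih
        rw [PySem.Chars.join_cons_cons]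
        simp [ih]
    · simp only [mySplit, hc, if_false]
      cases hm : mySplit rest with
      | nil => exact absurd hm (mySplit_ne_nil rest)
      | cons p ps =>
        rw [hm] at ih
        cases ps with
        | nil => simp_all [PySem.Chars.join_singleton]
        | cons q qs =>
          rw [PySem.Chars.join_cons_cons] at ih ⊢
          simp [← ih]

lemma mem_mySplit_no_nl {l p : List Char} (hp : p ∈ mySplit l) : '\n' ∉ p := by
  induction l generalizing p with
  | nil => simp [mySplit] at hp; simp [hp]
  | cons c rest ih =>
    by_cases hc : c = '\n'
    · subst hc
      simp only [mySplit, if_true] at hp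
      rcases List.mem_cons.mp hp with h1 | h2
      · simp [h1]
      · exact ih h2
    · simp only [mySplit, hc, if_false] at hp
      cases hm : mySplit rest with
      | nil => exact absurd hm (mySplit_ne_nil rest)
      | cons q qs =>
        rw [hm] at hp
        rcases List.mem_cons.mp hp with h1 | h2
        · subst h1
          intro hmem
          rcases List.mem_cons.mp hmem with h3 | h4
          · exact hc h3.symm
          · exact ih (hm ▸ List.mem_cons_self) h4
        · exact ih (hm ▸ List.mem_cons_of_mem _ h2)

lemma takeWhile_append_hit {α : Type} {p : α → Bool} (a : List α) (x : α) (z : List α)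
    (ha : ∀ c ∈ a, p c = true) (hx : p x = false) :
    (a ++ x :: z).takeWhile p = a ∧ (a ++ x :: z).dropWhile p = x :: z := by
  induction a with
  | nil => simp [List.takeWhile_cons, List.dropWhile_cons, hx]
  | cons b bs ih =>
    have hb : p b = true := ha b (by simp)
    have ih' := ih (fun c hc => ha c (by simp [hc]))
    simp [List.takeWhile_cons, List.dropWhile_cons, hb, ih'.1, ih'.2]

lemma lstrip_eq_nil_iff (l : List Char) : PySem.Chars.lstrip l = [] ↔ ∀ c ∈ l, PySem.Chars.isspace c = true := by
  simp [PySem.Chars.lstrip, List.dropWhile_eq_nil_iff]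

lemma rstrip_eq_nil_iff (l : List Char) : PySem.Chars.rstrip l = [] ↔ ∀ c ∈ l, PySem.Chars.isspace c = true := by
  simp [PySem.Chars.rstrip, List.dropWhile_eq_nil_iff]

lemma strip_eq_nil_iff (l : List Char) : PySem.Chars.strip l = [] ↔ ∀ c ∈ l, PySem.Chars.isspace c = true := by
  unfold PySem.Chars.strip
  rw [rstrip_eq_nil_iff]
  constructor
  · intro h c hc
    have hsplit := List.takeWhile_append_dropWhile (p := PySem.Chars.isspace) (l := l)
    rw [← hsplit] at hc
    rcases List.mem_append.mp hc with h1 | h2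
    · exact List.mem_takeWhile_imp h1
    · exact h c h2
  · intro h c hc
    exact h c ((List.dropWhile_sublist _).subset hc)

lemma mem_rstrip {c : Char} {l : List Char} (h : c ∈ PySem.Chars.rstrip l) : c ∈ l := by
  unfold PySem.Chars.rstrip at h
  rw [List.mem_reverse] at h
  exact List.mem_reverse.mp ((List.dropWhile_sublist _).subset h)

lemma mem_strip {c : Char} {l : List Char} (h : c ∈ PySem.Chars.strip l) : c ∈ l := by
  unfold PySem.Chars.strip at h
  exact (List.dropWhile_sublist _).subset (mem_rstrip h)

lemma lstrip_append_of_ne_nil {a : List Char} (h : PySem.Chars.lstrip a ≠ []) (b : List Char) :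
    PySem.Chars.lstrip (a ++ b) = PySem.Chars.lstrip a ++ b := by
  unfold PySem.Chars.lstrip at *
  rw [List.dropWhile_append]
  simp [List.isEmpty_iff, h]

lemma lstrip_append_of_blank {a : List Char} (h : ∀ c ∈ a, PySem.Chars.isspace c = true) (b : List Char) :
    PySem.Chars.lstrip (a ++ b) = PySem.Chars.lstrip b := by
  unfold PySem.Chars.lstrip
  rw [List.dropWhile_append]
  simp [List.isEmpty_iff, List.dropWhile_eq_nil_iff.mpr h]

lemma rstrip_append_of_ne_nil {b : List Char} (h : PySem.Chars.rstrip b ≠ []) (a : List Char) :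
    PySem.Chars.rstrip (a ++ b) = a ++ PySem.Chars.rstrip b := by
  unfold PySem.Chars.rstrip at *
  rw [List.reverse_append, List.dropWhile_append]
  have hne : ¬ (List.dropWhile PySem.Chars.isspace b.reverse) = [] := by
    intro hh; exact h (by simp [hh])
  simp [List.isEmpty_iff, hne]

lemma rstrip_append_of_blank {b : List Char} (h : ∀ c ∈ b, PySem.Chars.isspace c = true) (a : List Char) :
    PySem.Chars.rstrip (a ++ b) = PySem.Chars.rstrip a := by
  unfold PySem.Chars.rstrip
  rw [List.reverse_append, List.dropWhile_append]
  have : List.dropWhile PySem.Chars.isspace b.reverse = [] := by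
    rw [List.dropWhile_eq_nil_iff]
    intro c hc; exact h c (List.mem_reverse.mp hc)
  simp [List.isEmpty_iff, this]

lemma lstrip_idem (l : List Char) : PySem.Chars.lstrip (PySem.Chars.lstrip l) = PySem.Chars.lstrip l := by
  unfold PySem.Chars.lstrip
  exact List.dropWhile_idempotent ..

lemma rstrip_idem (l : List Char) : PySem.Chars.rstrip (PySem.Chars.rstrip l) = PySem.Chars.rstrip l := by
  unfold PySem.Chars.rstrip
  simp [List.dropWhile_idempotent]

lemma dropWhile_head_false {α : Type} {p : α → Bool} {l : List α} {c : α} {t : List α}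
    (h : List.dropWhile p l = c :: t) : p c = false := by
  induction l with
  | nil => simp at h
  | cons a l ih =>
    rw [List.dropWhile_cons] at h
    split at h
    · exact ih h
    · rename_i hpa
      cases h
      simpa using hpa

lemma lstrip_no_drop {c : Char} {t : List Char} (h : PySem.Chars.isspace c = false) :
    PySem.Chars.lstrip (c :: t) = c :: t := by
  simp [PySem.Chars.lstrip, List.dropWhile_cons, h]

lemma lstrip_rstrip_head {c : Char} {t : List Char} (h : PySem.Chars.isspace c = false) :
    PySem.Chars.lstrip (PySem.Chars.rstrip (c :: t)) = PySem.Chars.rstrip (c :: t) := by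
  by_cases ht : PySem.Chars.rstrip t = []
  · have hbl : ∀ x ∈ t, PySem.Chars.isspace x = true := (rstrip_eq_nil_iff t).mp ht
    have h1 : PySem.Chars.rstrip (c :: t) = PySem.Chars.rstrip [c] := by
      have := rstrip_append_of_blank hbl [c]
      simpa using this
    have h2 : PySem.Chars.rstrip [c] = [c] := by
      simp [PySem.Chars.rstrip, List.dropWhile_cons, h]
    rw [h1, h2, lstrip_no_drop h]
  · have h1 : PySem.Chars.rstrip (c :: t) = c :: PySem.Chars.rstrip t := by
      have := rstrip_append_of_ne_nil ht [c]
      simpa using this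
    rw [h1, lstrip_no_drop h]

lemma lstrip_rstrip_comm (l : List Char) :
    PySem.Chars.lstrip (PySem.Chars.rstrip l) = PySem.Chars.rstrip (PySem.Chars.lstrip l) := by
  cases hd : PySem.Chars.lstrip l with
  | nil =>
    have hbl : ∀ x ∈ l, PySem.Chars.isspace x = true := (lstrip_eq_nil_iff l).mp hd
    have h1 : PySem.Chars.rstrip l = [] := (rstrip_eq_nil_iff l).mpr hbl
    rw [h1]; rfl
  | cons c t =>
    have hc : PySem.Chars.isspace c = false := dropWhile_head_false hd
    have hsplit : l.takeWhile PySem.Chars.isspace ++ (c :: t) = l := by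
      rw [← hd]; exact List.takeWhile_append_dropWhile
    have hblank : ∀ x ∈ l.takeWhile PySem.Chars.isspace, PySem.Chars.isspace x = true :=
      fun x hx => List.mem_takeWhile_imp hx
    have hne : PySem.Chars.rstrip (c :: t) ≠ [] := by
      intro hh
      have := (rstrip_eq_nil_iff _).mp hh c (by simp)
      simp [hc] at this
    calc PySem.Chars.lstrip (PySem.Chars.rstrip l)
        = PySem.Chars.lstrip (PySem.Chars.rstrip (l.takeWhile PySem.Chars.isspace ++ (c :: t))) := by rw [hsplit]
      _ = PySem.Chars.lstrip (l.takeWhile PySem.Chars.isspace ++ PySem.Chars.rstrip (c :: t)) := by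
            rw [rstrip_append_of_ne_nil hne]
      _ = PySem.Chars.lstrip (PySem.Chars.rstrip (c :: t)) := lstrip_append_of_blank hblank _
      _ = PySem.Chars.rstrip (c :: t) := lstrip_rstrip_head hc

lemma strip_lstrip (l : List Char) : PySem.Chars.strip (PySem.Chars.lstrip l) = PySem.Chars.strip l := by
  unfold PySem.Chars.strip
  rw [lstrip_idem]

lemma strip_rstrip (l : List Char) : PySem.Chars.strip (PySem.Chars.rstrip l) = PySem.Chars.strip l := by
  unfold PySem.Chars.strip
  rw [lstrip_rstrip_comm, rstrip_idem]

lemma strip_strip (l : List Char) : PySem.Chars.strip (PySem.Chars.strip l) = PySem.Chars.strip l := by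
  unfold PySem.Chars.strip
  rw [lstrip_rstrip_comm (PySem.Chars.lstrip l), rstrip_idem, lstrip_idem]

-- dropping a blank first line (or leading blank lines) does not change join+strip
lemma strip_join_blank_cons {b : List Char} (hb : PySem.Chars.strip b = []) (M : List (List Char)) :
    PySem.Chars.strip (PySem.Chars.join ['\n'] (b :: M)) = PySem.Chars.strip (PySem.Chars.join ['\n'] M) := by
  have hb' : ∀ c ∈ b, PySem.Chars.isspace c = true := (strip_eq_nil_iff b).mp hb
  cases M with
  | nil =>
    rw [PySem.Chars.join_singleton, PySem.Chars.join_nil]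
    simpa using hb
  | cons m ms =>
    rw [PySem.Chars.join_cons_cons]
    unfold PySem.Chars.strip
    rw [List.append_assoc, lstrip_append_of_blank hb',
        lstrip_append_of_blank (a := ['\n']) (by intro c hc; simp at hc; subst hc; decide)]

lemma strip_join_dropWhile (L : List (List Char)) :
    PySem.Chars.strip (PySem.Chars.join ['\n'] (L.dropWhile pblank)) = PySem.Chars.strip (PySem.Chars.join ['\n'] L) := by
  induction L with
  | nil => rfl
  | cons b M ih =>
    by_cases hb : pblank b = true
    · rw [List.dropWhile_cons, if_pos hb, ih,
        strip_join_blank_cons (by simpa [pblank] using hb) M]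
    · rw [List.dropWhile_cons, if_neg hb]

-- the while loop is dropWhile
lemma skipBlanksA_drop (lines : List (List Char)) (i : Nat) :
    lines.drop (skipBlanksA lines i) = (lines.drop i).dropWhile pblank := by
  have main : ∀ n i, lines.length - i ≤ n →
      lines.drop (skipBlanksA lines i) = (lines.drop i).dropWhile pblank := by
    intro n
    induction n with
    | zero =>
      intro i hi
      have hlen : lines.length ≤ i := by omega
      rw [skipBlanksA]
      rw [dif_neg (by intro hh; omega)]
      rw [List.drop_eq_nil_of_le hlen, List.dropWhile_nil]
    | succ n ih =>
      intro i hi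
      by_cases h : i < lines.length ∧ PySem.Chars.strip (lines.getD i []) = []
      · rw [skipBlanksA, dif_pos h, ih (i + 1) (by omega)]
        rw [List.drop_eq_getElem_cons h.1, List.dropWhile_cons, if_pos]
        simp only [pblank, decide_eq_true_eq]
        rw [← List.getD_eq_getElem lines [] h.1]
        exact h.2
      · rw [skipBlanksA, dif_neg h]
        by_cases hlt : i < lines.length
        · have hs : PySem.Chars.strip (lines.getD i []) ≠ [] := fun hh => h ⟨hlt, hh⟩
          rw [List.drop_eq_getElem_cons hlt, List.dropWhile_cons, if_neg]
          simp only [pblank, decide_eq_true_eq]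
          rw [← List.getD_eq_getElem lines [] hlt]
          exact hs
        · rw [List.drop_eq_nil_of_le (by omega), List.dropWhile_nil]
  exact main (lines.length - i) i (le_refl _)

-- the for loop's result
lemma findStartA_spec (fn : List Char) : ∀ (L : List (List Char)) (i : Nat),
    (L.dropWhile pblank = [] → findStartA fn i L = 0) ∧
    (∀ l rest, L.dropWhile pblank = l :: rest →
      findStartA fn i L = if gtest fn l then i + (L.takeWhile pblank).length + 1 else 0) := by
  intro L
  induction L with
  | nil => intro i; exact ⟨fun _ => rfl, fun l rest h => by simp at h⟩
  | cons x M ih =>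
    intro i
    by_cases hx : pblank x = true
    · have hxs : PySem.Chars.strip x = [] := by simpa [pblank] using hx
      constructor
      · intro hnil
        rw [List.dropWhile_cons, if_pos hx] at hnil
        have := (ih (i + 1)).1 hnil
        simpa [findStartA, hxs] using this
      · intro l rest hlr
        rw [List.dropWhile_cons, if_pos hx] at hlr
        have := (ih (i + 1)).2 l rest hlr
        rw [show findStartA fn i (x :: M) = findStartA fn (i + 1) M by simp [findStartA, hxs]]
        rw [this, List.takeWhile_cons, if_pos hx]
        by_cases hg : gtest fn l = true <;> simp [hg] <;> omega
    · have hxs : PySem.Chars.strip x ≠ [] := by simpa [pblank] using hx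
      constructor
      · intro hnil
        rw [List.dropWhile_cons, if_neg hx] at hnil
        simp at hnil
      · intro l rest hlr
        rw [List.dropWhile_cons, if_neg hx] at hlr
        obtain ⟨hl, hrest⟩ : x = l ∧ M = rest := by
          constructor <;> [exact (List.cons.injEq .. ▸ hlr).1; exact (List.cons.injEq .. ▸ hlr).2]
        subst hl hrest
        rw [List.takeWhile_cons, if_neg hx]
        simp only [List.length_nil, Nat.add_zero]
        show findStartA fn i (x :: M) = if gtest fn x then i + 0 + 1 else 0
        unfold findStartA gtest
        rw [if_neg hxs]
        by_cases hfn : fn = [] <;>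
          cases hb1 : PySem.Chars.startswith (PySem.Chars.lower (PySem.Chars.strip x)) ('h' :: 'i' :: ' ' :: PySem.Chars.lower fn) <;>
          cases hb2 : PySem.Chars.startswith (PySem.Chars.lower (PySem.Chars.strip x)) ['h','i',' '] <;>
          cases hb3 : PySem.Chars.startswith (PySem.Chars.lower (PySem.Chars.strip x)) ['h','e','y',' '] <;>
          cases hb4 : PySem.Chars.startswith (PySem.Chars.lower (PySem.Chars.strip x)) ['h','e','l','l','o',' '] <;>
          simp [hfn, hb1, hb2, hb3, hb4]

-- KEY decomposition of strip (join (l :: rest)) for a non-blank newline-free l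
lemma key_first_line {l : List Char} (hnl : '\n' ∉ l) (hne : PySem.Chars.strip l ≠ []) (rest : List (List Char)) :
    PySem.Chars.strip (PySem.Chars.join ['\n'] (l :: rest)) ≠ [] ∧
    PySem.Chars.strip ((PySem.Chars.strip (PySem.Chars.join ['\n'] (l :: rest))).takeWhile (fun c => c != '\n')) = PySem.Chars.strip l ∧
    PySem.Chars.strip (((PySem.Chars.strip (PySem.Chars.join ['\n'] (l :: rest))).dropWhile (fun c => c != '\n')).drop 1) = PySem.Chars.strip (PySem.Chars.join ['\n'] rest) := by
  have hlst : PySem.Chars.lstrip l ≠ [] := by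
    intro hh
    apply hne
    unfold PySem.Chars.strip
    rw [hh]
    rfl
  have hmem_strip_ne : ∀ c ∈ PySem.Chars.strip l, (c != '\n') = true := by
    intro c hc
    have : c ∈ l := mem_strip hc
    simp only [bne_iff_ne, ne_eq]
    intro hcc; exact hnl (hcc ▸ this)
  have hself : (PySem.Chars.strip l).takeWhile (fun c => c != '\n') = PySem.Chars.strip l :=
    List.takeWhile_eq_self_iff.mpr hmem_strip_ne
  have hnildrop : (PySem.Chars.strip l).dropWhile (fun c => c != '\n') = [] :=
    List.dropWhile_eq_nil_iff.mpr hmem_strip_ne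
  cases rest with
  | nil =>
    rw [PySem.Chars.join_singleton, PySem.Chars.join_nil]
    exact ⟨hne, by rw [hself, strip_strip], by rw [hnildrop]; rfl⟩
  | cons m ms =>
    rw [PySem.Chars.join_cons_cons]
    by_cases hjr : PySem.Chars.strip (PySem.Chars.join ['\n'] (m :: ms)) = []
    · -- everything after the first line is whitespace
      have hblank : ∀ c ∈ ['\n'] ++ PySem.Chars.join ['\n'] (m :: ms), PySem.Chars.isspace c = true := by
        intro c hc
        rcases List.mem_append.mp hc with h1 | h2
        · simp at h1; subst h1; decide
        · exact (strip_eq_nil_iff _).mp hjr c h2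
      have hS : PySem.Chars.strip (l ++ ['\n'] ++ PySem.Chars.join ['\n'] (m :: ms)) = PySem.Chars.strip l := by
        unfold PySem.Chars.strip
        rw [List.append_assoc, lstrip_append_of_ne_nil hlst, rstrip_append_of_blank hblank]
      rw [hS, hself, hnildrop]
      exact ⟨hne, strip_strip l, by rw [hjr]; rfl⟩
    · -- a non-whitespace character occurs after the first line
      have hrjr : PySem.Chars.rstrip (PySem.Chars.join ['\n'] (m :: ms)) ≠ [] := by
        intro hh
        exact hjr ((strip_eq_nil_iff _).mpr ((rstrip_eq_nil_iff _).mp hh))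
      have h2 : PySem.Chars.rstrip (['\n'] ++ PySem.Chars.join ['\n'] (m :: ms))
          = '\n' :: PySem.Chars.rstrip (PySem.Chars.join ['\n'] (m :: ms)) := by
        simpa using rstrip_append_of_ne_nil hrjr ['\n']
      have h2ne : PySem.Chars.rstrip (['\n'] ++ PySem.Chars.join ['\n'] (m :: ms)) ≠ [] := by
        rw [h2]; simp
      have hS : PySem.Chars.strip (l ++ ['\n'] ++ PySem.Chars.join ['\n'] (m :: ms))
          = PySem.Chars.lstrip l ++ '\n' :: PySem.Chars.rstrip (PySem.Chars.join ['\n'] (m :: ms)) := by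
        unfold PySem.Chars.strip
        rw [List.append_assoc, lstrip_append_of_ne_nil hlst, rstrip_append_of_ne_nil h2ne, h2]
      have ha : ∀ c ∈ PySem.Chars.lstrip l, (c != '\n') = true := by
        intro c hc
        have : c ∈ l := (List.dropWhile_sublist _).subset hc
        simp only [bne_iff_ne, ne_eq]
        intro hcc; exact hnl (hcc ▸ this)
      have htw := takeWhile_append_hit (PySem.Chars.lstrip l) '\n'
        (PySem.Chars.rstrip (PySem.Chars.join ['\n'] (m :: ms))) ha (by decide)
      rw [hS]
      refine ⟨by simp, ?_, ?_⟩
      · rw [htw.1, strip_lstrip]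
      · rw [htw.2]
        simp only [List.drop_succ_cons, List.drop_zero]
        rw [strip_rstrip]

-- ===== VERDICT (by name: the statement is the Claim_ definition above) =====
theorem strip_greeting_py_spec : Claim_equal_strip_greeting_py := by
  intro body first_name _
  unfold Spec_strip_greeting_py strip_greeting_py strip_greeting_py_alt
  dsimp only
  have hjoin : PySem.Chars.join ['\n'] (PySem.Chars.splitOn body.toList ['\n']) = body.toList := by
    rw [splitOn_eq_mySplit]; exact join_mySplit _
  rw [skipBlanksA_drop, strip_join_dropWhile]
  obtain ⟨spec1, spec2⟩ := findStartA_spec first_name.toList (PySem.Chars.splitOn body.toList ['\n']) 0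
  cases hd : (PySem.Chars.splitOn body.toList ['\n']).dropWhile pblank with
  | nil =>
    rw [spec1 hd]
    have hempty : PySem.Chars.strip body.toList = [] := by
      conv_lhs => rw [← hjoin]
      rw [← strip_join_dropWhile, hd]
      rfl
    rw [if_pos hempty]
    simp only [List.drop_zero]
    rw [← strip_join_dropWhile, hd]
    rfl
  | cons l rest =>
    have hlb : pblank l = false := dropWhile_head_false hd
    have hls : PySem.Chars.strip l ≠ [] := by simpa [pblank] using hlb
    have hlm : l ∈ PySem.Chars.splitOn body.toList ['\n'] :=
      (List.dropWhile_sublist _).subset (hd ▸ List.mem_cons_self)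
    have hnl : '\n' ∉ l := mem_mySplit_no_nl (splitOn_eq_mySplit body.toList ▸ hlm)
    have hstr : PySem.Chars.strip body.toList = PySem.Chars.strip (PySem.Chars.join ['\n'] (l :: rest)) := by
      rw [← hd, strip_join_dropWhile, hjoin]
    obtain ⟨hSne, hSfirst, hSrest⟩ := key_first_line hnl hls rest
    rw [spec2 l rest hd, hstr, if_neg hSne, hSfirst]
    have hiff : ((first_name.toList ≠ [] ∧ PySem.Chars.startswith (PySem.Chars.lower (PySem.Chars.strip l)) ('h' :: 'i' :: ' ' :: PySem.Chars.lower first_name.toList) = true)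
        ∨ (PySem.Chars.startswith (PySem.Chars.lower (PySem.Chars.strip l)) ['h','i',' ']
          || PySem.Chars.startswith (PySem.Chars.lower (PySem.Chars.strip l)) ['h','e','y',' ']
          || PySem.Chars.startswith (PySem.Chars.lower (PySem.Chars.strip l)) ['h','e','l','l','o',' ']) = true)
        ↔ gtest first_name.toList l = true := by
      unfold gtest
      by_cases hfn : first_name.toList = [] <;>
        cases hb1 : PySem.Chars.startswith (PySem.Chars.lower (PySem.Chars.strip l)) ('h' :: 'i' :: ' ' :: PySem.Chars.lower first_name.toList) <;>
        cases hb2 : PySem.Chars.startswith (PySem.Chars.lower (PySem.Chars.strip l)) ['h','i',' '] <;>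
        cases hb3 : PySem.Chars.startswith (PySem.Chars.lower (PySem.Chars.strip l)) ['h','e','y',' '] <;>
        cases hb4 : PySem.Chars.startswith (PySem.Chars.lower (PySem.Chars.strip l)) ['h','e','l','l','o',' '] <;>
        simp [hfn, hb1, hb2, hb3, hb4]
    by_cases hg : gtest first_name.toList l = true
    · rw [if_pos hg, if_pos (hiff.mpr hg), hSrest]
      have htw : (PySem.Chars.splitOn body.toList ['\n']).takeWhile pblank ++ l :: rest
          = PySem.Chars.splitOn body.toList ['\n'] := by
        conv_rhs => rw [← List.takeWhile_append_dropWhile (p := pblank) (l := PySem.Chars.splitOn body.toList ['\n']), hd]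
      have hdrop : ∀ (a : List (List Char)), (a ++ l :: rest).drop (0 + a.length + 1) = rest := by
        intro a
        rw [Nat.zero_add, ← List.drop_drop, List.drop_left]
        simp
      have hkey := hdrop ((PySem.Chars.splitOn body.toList ['\n']).takeWhile pblank)
      rw [htw] at hkey
      rw [hkey]
    · rw [if_neg hg, if_neg (fun hc => hg (hiff.mp hc))]
      simp only [List.drop_zero]
      conv_lhs => rw [← strip_join_dropWhile, hd]
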